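-- pv_equiv track=rewrite | github.com/yongchao98/Code-as-Symbolic-Planner | benchmark/run_Gridworld_RoboSteer_test.py | bfs_path_exists
-- ===== SOURCE A (Python) =====
-- from typing import List, Tuple, Dict
--
-- def bfs_path_exists(start: str, end: str, adjacency: Dict[str, List[str]],
--                     obstacles: List[str]) -> bool:
--     """
--     Simple BFS to check if there is a path from start to end
--     without going through any obstacles.
--     """
--     if start == end:
--         return True
--     visited = set([start])
--     queue = [start]
--     while queue:
--         current = queue.pop(0)
--         if current == end:
--             return True
--         for neighbor in adjacency[current]:
--             if neighbor not in visited and neighbor not in obstacles: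
--                 visited.add(neighbor)
--                 queue.append(neighbor)
--     return False
-- ===== SOURCE B (Python) =====
-- def bfs_path_exists(start: str, end: str, adjacency, obstacles) -> bool:
--     """Round-based saturation: instead of a FIFO queue, repeatedly compute the
--     whole set of newly reachable non-obstacle nodes until a fixpoint, then
--     test membership of end.  Same boolean: reachability is order-independent."""
--     if start == end:
--         return True
--     reach = [start]
--     while True:
--         new = []
--         for node in reach:
--             if node == end:
--                 continue
--             for n in adjacency[node]:
--                 if n not in obstacles and n not in reach and n not in new:
--                     new.append(n)
--         if not new:
--             return end in reach
--         reach += new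
-- ===== Notes on version B (the rewrite author's own statement) =====
-- stated objective: alternative
-- what changed: Replaced the FIFO-queue BFS with round-based fixpoint saturation: each round scans the whole reached set, collects all new non-obstacle neighbors, and stops at a fixpoint, testing end-membership then; no queue or per-node pop exists in B.
-- outside the precondition, e.g. on bfs_path_exists('a', 'b', {'a': ['b', 'c']}, []): A returns True, B raises KeyError; on bfs_path_exists('a', 'b', {'a': ['b'], 'b': ['c']}, []): A returns True, B returns True
import Mathlib
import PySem

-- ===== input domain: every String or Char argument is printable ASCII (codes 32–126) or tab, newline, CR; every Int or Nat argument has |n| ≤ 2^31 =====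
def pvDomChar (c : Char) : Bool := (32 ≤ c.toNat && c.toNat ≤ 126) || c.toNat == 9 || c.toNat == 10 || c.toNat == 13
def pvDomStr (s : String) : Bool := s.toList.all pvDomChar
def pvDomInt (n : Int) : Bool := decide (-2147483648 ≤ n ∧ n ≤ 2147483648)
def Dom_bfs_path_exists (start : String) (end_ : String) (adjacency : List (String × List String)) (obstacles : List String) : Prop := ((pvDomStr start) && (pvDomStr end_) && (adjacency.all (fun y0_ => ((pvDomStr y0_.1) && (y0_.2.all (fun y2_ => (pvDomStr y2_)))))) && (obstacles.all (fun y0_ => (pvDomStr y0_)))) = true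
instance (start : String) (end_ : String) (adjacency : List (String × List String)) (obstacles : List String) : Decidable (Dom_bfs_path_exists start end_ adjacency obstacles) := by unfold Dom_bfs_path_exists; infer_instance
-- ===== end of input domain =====

-- B replaces A's FIFO-queue BFS by round-based fixpoint saturation (collect all new non-obstacle neighbors of the whole reached set each round); same Bool on all inputs where A returns (Pre_).


-- ===== PORT A =====
-- inner `for neighbor in adjacency[current]` loop of A: enqueue unvisited non-obstacle neighbors at the queue's END
def pvStepA (obstacles : List String) (st : PySem.Set String × List String) (neighbors : List String) : PySem.Set String × List String :=
  neighbors.foldl (fun st n =>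
    if !(PySem.Set.contains st.1 n) && !(obstacles.contains n) then (PySem.Set.add st.1 n, st.2 ++ [n]) else st) st

-- A's `while queue:` loop; fuel only makes the recursion structural (1 + Σ|adjacency values| pops always suffice)
def pvLoopA (end_ : String) (adjacency : List (String × List String)) (obstacles : List String) :
    Nat → PySem.Set String → List String → Bool
  | 0, _, _ => false
  | _ + 1, _, [] => false
  | fuel + 1, visited, current :: rest =>
    if current = end_ then true
    else
      let st := pvStepA obstacles (visited, rest) (PySem.Dict.getD (PySem.Dict.mk adjacency) current [])
      pvLoopA end_ adjacency obstacles fuel st.1 st.2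

def pvFuel (adjacency : List (String × List String)) : Nat :=
  1 + adjacency.foldl (fun acc kv => acc + kv.2.length) 0

def bfs_path_exists (start : String) (end_ : String) (adjacency : List (String × List String)) (obstacles : List String) : Bool :=
  if start = end_ then true
  else pvLoopA end_ adjacency obstacles (pvFuel adjacency) (PySem.Set.ofList [start]) [start]

-- ===== PORT B =====
-- one saturation round of B: scan the whole reached list, collect all new non-obstacle neighbors (end is never expanded)
def pvRound (end_ : String) (adjacency : List (String × List String)) (obstacles : List String) (reach : List String) : List String :=
  reach.foldl (fun new node =>
    if node = end_ then new
    else (PySem.Dict.getD (PySem.Dict.mk adjacency) node []).foldl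
      (fun new n => if !(obstacles.contains n) && !(reach.contains n) && !(new.contains n) then new ++ [n] else new) new) []

-- B's `while True:` loop; fuel only makes the recursion structural (each round grows reach, 1 + Σ|adjacency values| rounds always suffice)
def pvSatB (end_ : String) (adjacency : List (String × List String)) (obstacles : List String) :
    Nat → List String → Bool
  | 0, _ => false
  | fuel + 1, reach =>
    let new := pvRound end_ adjacency obstacles reach
    if new = [] then reach.contains end_
    else pvSatB end_ adjacency obstacles fuel (reach ++ new)

def bfs_path_exists_alt (start : String) (end_ : String) (adjacency : List (String × List String)) (obstacles : List String) : Bool :=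
  if start = end_ then true
  else pvSatB end_ adjacency obstacles (pvFuel adjacency) [start]

-- ===== PRECONDITION & SPEC =====
-- Pre_ excludes inputs where some non-obstacle neighbor other than end_ (or start itself) has no adjacency entry: there A
-- can raise KeyError when it expands that node (and B can raise KeyError when it expands it in a later round); it is a
-- closed-form over-approximation, so it also drops some inputs on which A happens to return before touching the missing key.
def Pre_bfs_path_exists (start : String) (end_ : String) (adjacency : List (String × List String)) (obstacles : List String) : Prop :=
  start = end_ ∨ (start ∈ adjacency.map Prod.fst ∧
    ∀ kv ∈ adjacency, ∀ v ∈ kv.2, v ∈ obstacles ∨ v = end_ ∨ v ∈ adjacency.map Prod.fst)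
instance (start : String) (end_ : String) (adjacency : List (String × List String)) (obstacles : List String) : Decidable (Pre_bfs_path_exists start end_ adjacency obstacles) := by unfold Pre_bfs_path_exists; infer_instance

def pvWitness_bfs_path_exists : String × String × (List (String × List String)) × List String :=
  ("a", "b", [("a", ["b"]), ("b", [])], [])

def Spec_bfs_path_exists (start : String) (end_ : String) (adjacency : List (String × List String)) (obstacles : List String) (out : Bool) : Prop := out = bfs_path_exists_alt start end_ adjacency obstacles
instance (start : String) (end_ : String) (adjacency : List (String × List String)) (obstacles : List String) (out : Bool) : Decidable (Spec_bfs_path_exists start end_ adjacency obstacles out) := by unfold Spec_bfs_path_exists; infer_instance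

-- ===== CLAIM (what is proved, stated in full; the proofs are below) =====
def Claim_equal_bfs_path_exists : Prop := ∀ (start : String) (end_ : String) (adjacency : List (String × List String)) (obstacles : List String), Dom_bfs_path_exists start end_ adjacency obstacles → Pre_bfs_path_exists start end_ adjacency obstacles → Spec_bfs_path_exists start end_ adjacency obstacles (bfs_path_exists start end_ adjacency obstacles)

-- ===== LEMMAS AND PROOFS =====

-- neighbors of u (A indexes adjacency[u]; getD [] is definitionally the port's expression)
def pvNbrs (adjacency : List (String × List String)) (u : String) : List String :=
  PySem.Dict.getD (PySem.Dict.mk adjacency) u []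

-- all strings that occur as a neighbor anywhere, deduplicated
def pvCand (adjacency : List (String × List String)) : List String :=
  PySem.List.dedup (adjacency.flatMap Prod.snd)

-- number of candidate nodes not yet in vis
def pvUnvis (adjacency : List (String × List String)) (vis : List String) : Nat :=
  ((pvCand adjacency).filter (fun c => decide (c ∉ vis))).length

-- nodes reachable from start via non-obstacle nodes, never stepping out of end_
inductive pvReach (adjacency : List (String × List String)) (obstacles : List String) (end_ start : String) : String → Prop
  | base : pvReach adjacency obstacles end_ start start
  | step {u v : String} : pvReach adjacency obstacles end_ start u → u ≠ end_ →
      v ∈ pvNbrs adjacency u → v ∉ obstacles → pvReach adjacency obstacles end_ start v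

theorem pvNbrs_subset_cand (adjacency : List (String × List String)) (u v : String)
    (h : v ∈ pvNbrs adjacency u) : v ∈ pvCand adjacency := by
  unfold pvNbrs PySem.Dict.getD PySem.Dict.get? at h
  rcases hf : List.find? (fun p => p.1 == u) (PySem.Dict.mk adjacency).items with _ | p
  · rw [hf] at h; simp at h
  · rw [hf] at h
    simp only [Option.map_some, Option.getD_some] at h
    have hp : p ∈ adjacency := List.mem_of_find?_eq_some hf
    rw [pvCand, PySem.List.mem_dedup]
    exact List.mem_flatMap.mpr ⟨p, hp, h⟩

theorem filter_mem_drop (n : String) : ∀ (l vis : List String), l.Nodup → n ∈ l → n ∉ vis →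
    (l.filter (fun c => decide (c ∉ vis ++ [n]))).length + 1 = (l.filter (fun c => decide (c ∉ vis))).length := by
  intro l
  induction l with
  | nil => intro vis _ h; simp at h
  | cons a l ih =>
    intro vis hnd hm hnv
    have hnd' := hnd.of_cons
    have hna : a ∉ l := (List.nodup_cons.mp hnd).1
    rcases List.mem_cons.mp hm with heq | hml
    · subst heq
      have h1 : (decide (n ∉ vis ++ [n])) = false := by simp
      have h2 : (decide (n ∉ vis)) = true := by simpa using hnv
      rw [List.filter_cons, List.filter_cons, h1, h2]
      have heqf : List.filter (fun c => decide (c ∉ vis ++ [n])) l = List.filter (fun c => decide (c ∉ vis)) l := by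
        apply List.filter_congr
        intro x hx
        have hxa : x ≠ n := fun hh => hna (hh ▸ hx)
        rw [decide_eq_decide]
        simp [List.mem_append, hxa]
      rw [heqf, if_neg (by simp), if_pos rfl]
      simp
    · rw [List.filter_cons, List.filter_cons]
      have hrec := ih vis hnd' hml hnv
      by_cases hav : a ∈ vis
      · have h1 : (decide (a ∉ vis ++ [n])) = false := by simp [hav]
        have h2 : (decide (a ∉ vis)) = false := by simp [hav]
        rw [h1, h2]; simpa using hrec
      · by_cases han : a = n
        · exact absurd (han ▸ hml) hna
        · have h1 : (decide (a ∉ vis ++ [n])) = true := by simp [hav, han]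
          have h2 : (decide (a ∉ vis)) = true := by simp [hav]
          rw [h1, h2, if_pos rfl, if_pos rfl]
          simp only [List.length_cons]; omega

theorem pvUnvis_add (adjacency : List (String × List String)) (vis : List String) (n : String)
    (h1 : n ∈ pvCand adjacency) (h2 : n ∉ vis) :
    pvUnvis adjacency (vis ++ [n]) + 1 = pvUnvis adjacency vis :=
  filter_mem_drop n (pvCand adjacency) vis (PySem.List.nodup_dedup _) h1 h2

theorem pvUnvis_le (adjacency : List (String × List String)) (vis : List String) :
    pvUnvis adjacency vis ≤ (pvCand adjacency).length :=
  List.length_filter_le _ _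

theorem ofList_len_le : ∀ (xs acc : List String), (xs.foldl PySem.Set.add acc).length ≤ acc.length + xs.length := by
  intro xs
  induction xs with
  | nil => intro acc; simp
  | cons x xs ih =>
    intro acc
    have h := ih (PySem.Set.add acc x)
    have : (PySem.Set.add acc x).length ≤ acc.length + 1 := by
      unfold PySem.Set.add; split <;> simp
    simp only [List.foldl_cons, List.length_cons]
    omega

theorem foldl_len (l : List (String × List String)) : ∀ (a : Nat),
    l.foldl (fun acc kv => acc + kv.2.length) a = a + (l.flatMap Prod.snd).length := by
  induction l with
  | nil => intro a; simp
  | cons kv l ih => intro a; simp [List.flatMap_cons, ih]; omega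

theorem pvFuel_ge (adjacency : List (String × List String)) :
    1 + (pvCand adjacency).length ≤ pvFuel adjacency := by
  have h1 : (pvCand adjacency).length ≤ (adjacency.flatMap Prod.snd).length := by
    rw [pvCand, PySem.List.dedup_eq_ofList, PySem.Set.ofList]
    have := ofList_len_le (adjacency.flatMap Prod.snd) []
    simpa using this
  rw [pvFuel, foldl_len]
  omega

theorem foldl_prefix {α β : Type} (f : List β → α → List β) (h : ∀ acc x, acc <+: f acc x) :
    ∀ (l : List α) (acc : List β), acc <+: l.foldl f acc := by
  intro l
  induction l with
  | nil => intro acc; exact List.prefix_rfl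
  | cons x xs ih => intro acc; exact (h acc x).trans (ih (f acc x))

-- all facts about A's inner neighbor loop, proved in one fold induction
theorem pvStepA_props (adjacency : List (String × List String)) (obstacles : List String)
    (ns : List String) (hns : ∀ n ∈ ns, n ∈ pvCand adjacency) :
    ∀ (vis : PySem.Set String) (q : List String),
      (∀ x, x ∈ vis → x ∈ (pvStepA obstacles (vis, q) ns).1) ∧
      (∀ x, x ∈ q → x ∈ (pvStepA obstacles (vis, q) ns).2) ∧
      (∀ x, x ∈ (pvStepA obstacles (vis, q) ns).1 → x ∈ vis ∨ (x ∈ ns ∧ x ∉ obstacles)) ∧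
      (∀ x, x ∈ (pvStepA obstacles (vis, q) ns).2 → x ∈ q ∨ x ∈ (pvStepA obstacles (vis, q) ns).1) ∧
      (∀ n ∈ ns, n ∉ obstacles → n ∈ (pvStepA obstacles (vis, q) ns).1) ∧
      ((pvStepA obstacles (vis, q) ns).2.length + pvUnvis adjacency (pvStepA obstacles (vis, q) ns).1
        = q.length + pvUnvis adjacency vis) ∧
      (∀ x, x ∈ (pvStepA obstacles (vis, q) ns).1 → x ∈ vis ∨ x ∈ (pvStepA obstacles (vis, q) ns).2) := by
  induction ns with
  | nil =>
    intro vis q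
    refine ⟨fun x hx => hx, fun x hx => hx, fun x hx => Or.inl hx, fun x hx => Or.inl hx,
      fun m hm => absurd hm (List.not_mem_nil), by simp [pvStepA], fun x hx => Or.inl hx⟩
  | cons n ns ih =>
    intro vis q
    have hns' : ∀ m ∈ ns, m ∈ pvCand adjacency := fun m hm => hns m (List.mem_cons_of_mem _ hm)
    have hcons : ∀ st : PySem.Set String × List String, pvStepA obstacles st (n :: ns) =
        pvStepA obstacles
          (if !(PySem.Set.contains st.1 n) && !(obstacles.contains n)
           then (PySem.Set.add st.1 n, st.2 ++ [n]) else st) ns := fun st => rfl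
    by_cases hcond : (!(PySem.Set.contains vis n) && !(obstacles.contains n)) = true
    · obtain ⟨hvn, hno⟩ : n ∉ vis ∧ n ∉ obstacles := by
        simpa [PySem.Set.contains] using hcond
      have hadd : PySem.Set.add vis n = vis ++ [n] := by
        simp [PySem.Set.add, PySem.Set.contains, hvn]
      simp only [hcons, if_pos hcond, hadd]
      obtain ⟨c1, c2, c3, c4, c5, c6, c7⟩ := ih hns' (vis ++ [n]) (q ++ [n])
      refine ⟨?_, ?_, ?_, ?_, ?_, ?_, ?_⟩
      · exact fun x hx => c1 x (List.mem_append_left _ hx)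
      · exact fun x hx => c2 x (List.mem_append_left _ hx)
      · intro x hx
        rcases c3 x hx with hxv | ⟨hxn, hxo⟩
        · rcases List.mem_append.mp hxv with hxv | hxn
          · exact Or.inl hxv
          · have : x = n := by simpa using hxn
            exact Or.inr ⟨this ▸ List.mem_cons_self, this ▸ hno⟩
        · exact Or.inr ⟨List.mem_cons_of_mem _ hxn, hxo⟩
      · intro x hx
        rcases c4 x hx with hxq | hx1
        · rcases List.mem_append.mp hxq with hxq | hxn
          · exact Or.inl hxq
          · exact Or.inr (c1 x (List.mem_append_right _ hxn))
        · exact Or.inr hx1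
      · intro m hm hmo
        rcases List.mem_cons.mp hm with heq | hm'
        · exact c1 m (heq ▸ List.mem_append_right _ (List.mem_singleton.mpr rfl))
        · exact c5 m hm' hmo
      · have hU := pvUnvis_add adjacency vis n (hns n List.mem_cons_self) hvn
        rw [c6]
        simp only [List.length_append, List.length_cons, List.length_nil]
        omega
      · intro x hx
        rcases c7 x hx with hxv | hx2
        · rcases List.mem_append.mp hxv with hxv | hxn
          · exact Or.inl hxv
          · exact Or.inr (c2 x (List.mem_append_right _ hxn))
        · exact Or.inr hx2
    · simp only [hcons, if_neg hcond]
      obtain ⟨c1, c2, c3, c4, c5, c6, c7⟩ := ih hns' vis q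
      refine ⟨c1, c2, ?_, c4, ?_, c6, c7⟩
      · intro x hx
        rcases c3 x hx with hxv | ⟨hxn, hxo⟩
        · exact Or.inl hxv
        · exact Or.inr ⟨List.mem_cons_of_mem _ hxn, hxo⟩
      · intro m hm hmo
        rcases List.mem_cons.mp hm with heq | hm'
        · subst heq
          have hmv : m ∈ vis := by
            by_contra hc
            exact hcond (by simp [PySem.Set.contains, hc, hmo])
          exact c1 m hmv
        · exact c5 m hm' hmo

theorem pvReach_subset_closed (adjacency : List (String × List String)) (obstacles : List String)
    (end_ start : String) (vis : List String)
    (hstart : start ∈ vis)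
    (hclosed : ∀ u ∈ vis, u ≠ end_ → ∀ n ∈ pvNbrs adjacency u, n ∉ obstacles → n ∈ vis) :
    ∀ x, pvReach adjacency obstacles end_ start x → x ∈ vis := by
  intro x hx
  induction hx with
  | base => exact hstart
  | step hu hne hv hob ih => exact hclosed _ ih hne _ hv hob

theorem pvLoopA_iff (adjacency : List (String × List String)) (obstacles : List String)
    (end_ start : String) :
    ∀ (fuel : Nat) (vis : PySem.Set String) (queue : List String),
      (∀ x, x ∈ queue → x ∈ vis) →
      (∀ x, x ∈ vis → pvReach adjacency obstacles end_ start x) →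
      start ∈ vis →
      (end_ ∈ vis → end_ ∈ queue) →
      (∀ u ∈ vis, u ∉ queue → u ≠ end_ → ∀ n ∈ pvNbrs adjacency u, n ∉ obstacles → n ∈ vis) →
      queue.length + pvUnvis adjacency vis ≤ fuel →
      (pvLoopA end_ adjacency obstacles fuel vis queue = true ↔
        pvReach adjacency obstacles end_ start end_) := by
  intro fuel
  induction fuel with
  | zero =>
    intro vis queue hsub hvisR hstart hend hclosed hfuel
    have hq : queue = [] := List.length_eq_zero_iff.mp (by omega)
    subst hq
    rw [show pvLoopA end_ adjacency obstacles 0 vis [] = false from rfl]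
    simp only [Bool.false_eq_true, false_iff]
    intro hr
    have hin := pvReach_subset_closed adjacency obstacles end_ start vis hstart
      (fun u hu hne => hclosed u hu List.not_mem_nil hne) _ hr
    exact List.not_mem_nil (hend hin)
  | succ f ih =>
    intro vis queue hsub hvisR hstart hend hclosed hfuel
    cases queue with
    | nil =>
      rw [show pvLoopA end_ adjacency obstacles (f + 1) vis [] = false from rfl]
      simp only [Bool.false_eq_true, false_iff]
      intro hr
      have hin := pvReach_subset_closed adjacency obstacles end_ start vis hstart
        (fun u hu hne => hclosed u hu List.not_mem_nil hne) _ hr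
      exact List.not_mem_nil (hend hin)
    | cons c rest =>
      by_cases hc : c = end_
      · rw [show pvLoopA end_ adjacency obstacles (f + 1) vis (c :: rest) = true from by
          simp [pvLoopA, hc]]
        simp only [true_iff]
        exact hc ▸ hvisR c (hsub c List.mem_cons_self)
      · have hstep : pvLoopA end_ adjacency obstacles (f + 1) vis (c :: rest) =
            pvLoopA end_ adjacency obstacles f
              (pvStepA obstacles (vis, rest) (pvNbrs adjacency c)).1
              (pvStepA obstacles (vis, rest) (pvNbrs adjacency c)).2 := by
          simp only [pvLoopA, if_neg hc]
          rfl
        rw [hstep]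
        obtain ⟨c1, c2, c3, c4, c5, c6, c7⟩ := pvStepA_props adjacency obstacles
          (pvNbrs adjacency c) (fun m hm => pvNbrs_subset_cand adjacency c m hm) vis rest
        apply ih
        · intro x hx
          rcases c4 x hx with hxr | hx1
          · exact c1 x (hsub x (List.mem_cons_of_mem _ hxr))
          · exact hx1
        · intro x hx
          rcases c3 x hx with hxv | ⟨hxn, hxo⟩
          · exact hvisR x hxv
          · exact pvReach.step (hvisR c (hsub c List.mem_cons_self)) hc hxn hxo
        · exact c1 start hstart
        · intro hm
          rcases c7 end_ hm with hv | h2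
          · rcases List.mem_cons.mp (hend hv) with heq | hr
            · exact absurd heq.symm hc
            · exact c2 end_ hr
          · exact h2
        · intro u hu hnq hne
          have huv : u ∈ vis := by
            rcases c7 u hu with h | h
            · exact h
            · exact absurd h hnq
          by_cases huc : u = c
          · subst huc
            intro m hm hmo
            exact c5 m hm hmo
          · have hur : u ∉ c :: rest := by
              intro hmem
              rcases List.mem_cons.mp hmem with h | h
              · exact huc h
              · exact hnq (c2 u h)
            intro m hm hmo
            exact c1 m (hclosed u huv hur hne m hm hmo)
        · simp only [List.length_cons] at hfuel
          omega

theorem pvInner_prefix (obstacles reach : List String) (ns acc : List String) :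
    acc <+: ns.foldl (fun new n =>
      if !(obstacles.contains n) && !(reach.contains n) && !(new.contains n)
      then new ++ [n] else new) acc := by
  apply foldl_prefix
  intro a n
  split
  · exact List.prefix_append _ _
  · exact List.prefix_rfl

theorem pvOuter_prefix (end_ : String) (adjacency : List (String × List String))
    (obstacles reach : List String) (l acc : List String) :
    acc <+: l.foldl (fun new node =>
      if node = end_ then new
      else (PySem.Dict.getD (PySem.Dict.mk adjacency) node []).foldl
        (fun new n => if !(obstacles.contains n) && !(reach.contains n) && !(new.contains n)
          then new ++ [n] else new) new) acc := by
  apply foldl_prefix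
  intro a node
  split
  · exact List.prefix_rfl
  · exact pvInner_prefix obstacles reach _ a

theorem pvInner_mem (obstacles reach : List String) :
    ∀ (ns acc : List String) (x : String),
      x ∈ ns.foldl (fun new n =>
        if !(obstacles.contains n) && !(reach.contains n) && !(new.contains n)
        then new ++ [n] else new) acc →
      x ∈ acc ∨ (x ∈ ns ∧ x ∉ obstacles ∧ x ∉ reach) := by
  intro ns
  induction ns with
  | nil => intro acc x hx; exact Or.inl hx
  | cons n ns ih =>
    intro acc x hx
    rw [List.foldl_cons] at hx
    by_cases hcond : (!(obstacles.contains n) && !(reach.contains n) && !(acc.contains n)) = true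
    · rw [if_pos hcond] at hx
      obtain ⟨⟨hno, hnr⟩, -⟩ : (n ∉ obstacles ∧ n ∉ reach) ∧ n ∉ acc := by simpa using hcond
      rcases ih (acc ++ [n]) x hx with hxa | ⟨hxn, hxo, hxr⟩
      · rcases List.mem_append.mp hxa with hxa | hxn
        · exact Or.inl hxa
        · have hx_eq : x = n := by simpa using hxn
          exact Or.inr ⟨hx_eq ▸ List.mem_cons_self, hx_eq ▸ hno, hx_eq ▸ hnr⟩
      · exact Or.inr ⟨List.mem_cons_of_mem _ hxn, hxo, hxr⟩
    · rw [if_neg hcond] at hx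
      rcases ih acc x hx with hxa | ⟨hxn, hxo, hxr⟩
      · exact Or.inl hxa
      · exact Or.inr ⟨List.mem_cons_of_mem _ hxn, hxo, hxr⟩

theorem pvOuter_mem (end_ : String) (adjacency : List (String × List String))
    (obstacles reach : List String) :
    ∀ (l acc : List String) (x : String), (∀ u ∈ l, u ∈ reach) →
      x ∈ l.foldl (fun new node =>
        if node = end_ then new
        else (PySem.Dict.getD (PySem.Dict.mk adjacency) node []).foldl
          (fun new n => if !(obstacles.contains n) && !(reach.contains n) && !(new.contains n)
            then new ++ [n] else new) new) acc →
      x ∈ acc ∨ (x ∉ obstacles ∧ x ∉ reach ∧ ∃ u ∈ reach, u ≠ end_ ∧ x ∈ pvNbrs adjacency u) := by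
  intro l
  induction l with
  | nil => intro acc x _ hx; exact Or.inl hx
  | cons a l ih =>
    intro acc x hl hx
    rw [List.foldl_cons] at hx
    have hl' : ∀ u ∈ l, u ∈ reach := fun u hu => hl u (List.mem_cons_of_mem _ hu)
    by_cases ha : a = end_
    · rw [if_pos ha] at hx
      exact ih acc x hl' hx
    · rw [if_neg ha] at hx
      rcases ih _ x hl' hx with hxa | hrest
      · rcases pvInner_mem obstacles reach _ acc x hxa with hxa | ⟨hxn, hxo, hxr⟩
        · exact Or.inl hxa
        · exact Or.inr ⟨hxo, hxr, a, hl a List.mem_cons_self, ha, hxn⟩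
      · exact Or.inr hrest

theorem pvInner_ne (obstacles reach : List String) :
    ∀ (ns : List String), (∃ n ∈ ns, n ∉ obstacles ∧ n ∉ reach) →
      ∀ (acc : List String), ns.foldl (fun new n =>
        if !(obstacles.contains n) && !(reach.contains n) && !(new.contains n)
        then new ++ [n] else new) acc ≠ [] := by
  intro ns
  induction ns with
  | nil => rintro ⟨n, hn, _⟩; exact absurd hn List.not_mem_nil
  | cons m ns ih =>
    rintro ⟨n, hn, hno, hnr⟩ acc
    rw [List.foldl_cons]
    by_cases hcond : (!(obstacles.contains m) && !(reach.contains m) && !(acc.contains m)) = true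
    · rw [if_pos hcond]
      intro hnil
      have hpre := pvInner_prefix obstacles reach ns (acc ++ [m])
      rw [hnil] at hpre
      have := List.prefix_nil.mp hpre
      simp at this
    · rw [if_neg hcond]
      rcases List.mem_cons.mp hn with heq | hn'
      · subst heq
        have hma : n ∈ acc := by
          by_contra hc
          exact hcond (by simp [hno, hnr, hc])
        intro hnil
        have hpre := pvInner_prefix obstacles reach ns acc
        rw [hnil] at hpre
        rw [List.prefix_nil.mp hpre] at hma
        exact List.not_mem_nil hma
      · exact ih ⟨n, hn', hno, hnr⟩ acc

theorem pvOuter_ne (end_ : String) (adjacency : List (String × List String))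
    (obstacles reach : List String) (u : String) (hne : u ≠ end_)
    (hw : ∃ n ∈ pvNbrs adjacency u, n ∉ obstacles ∧ n ∉ reach) :
    ∀ (l acc : List String), u ∈ l →
      l.foldl (fun new node =>
        if node = end_ then new
        else (PySem.Dict.getD (PySem.Dict.mk adjacency) node []).foldl
          (fun new n => if !(obstacles.contains n) && !(reach.contains n) && !(new.contains n)
            then new ++ [n] else new) new) acc ≠ [] := by
  intro l
  induction l with
  | nil => intro acc hu; exact absurd hu List.not_mem_nil
  | cons a l ih =>
    intro acc hu
    rw [List.foldl_cons]
    rcases List.mem_cons.mp hu with heq | hu'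
    · subst heq
      rw [if_neg hne]
      intro hnil
      have hpre := pvOuter_prefix end_ adjacency obstacles reach l
        ((PySem.Dict.getD (PySem.Dict.mk adjacency) u []).foldl (fun new n =>
          if !(obstacles.contains n) && !(reach.contains n) && !(new.contains n)
          then new ++ [n] else new) acc)
      rw [hnil] at hpre
      exact pvInner_ne obstacles reach _ hw acc (List.prefix_nil.mp hpre)
    · exact ih _ hu'

-- membership in one round: every collected node is a fresh non-obstacle neighbor of a non-end reached node
theorem pvRound_mem (end_ : String) (adjacency : List (String × List String))
    (obstacles reach : List String) (x : String)
    (hx : x ∈ pvRound end_ adjacency obstacles reach) :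
    x ∉ reach ∧ x ∉ obstacles ∧ ∃ u ∈ reach, u ≠ end_ ∧ x ∈ pvNbrs adjacency u := by
  rcases pvOuter_mem end_ adjacency obstacles reach reach [] x (fun u hu => hu) hx with h | ⟨h1, h2, h3⟩
  · exact absurd h List.not_mem_nil
  · exact ⟨h2, h1, h3⟩

-- an empty round means reach is closed
theorem pvRound_nil_closed (end_ : String) (adjacency : List (String × List String))
    (obstacles reach : List String)
    (h : pvRound end_ adjacency obstacles reach = []) :
    ∀ u ∈ reach, u ≠ end_ → ∀ n ∈ pvNbrs adjacency u, n ∉ obstacles → n ∈ reach := by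
  intro u hu hne n hn hno
  by_contra hnr
  exact pvOuter_ne end_ adjacency obstacles reach u hne ⟨n, hn, hno, hnr⟩ reach [] hu h

theorem pvSatB_iff (adjacency : List (String × List String)) (obstacles : List String)
    (end_ start : String) :
    ∀ (fuel : Nat) (reach : List String),
      (∀ x, x ∈ reach → pvReach adjacency obstacles end_ start x) →
      start ∈ reach →
      1 + pvUnvis adjacency reach ≤ fuel →
      (pvSatB end_ adjacency obstacles fuel reach = true ↔
        pvReach adjacency obstacles end_ start end_) := by
  intro fuel
  induction fuel with
  | zero =>
    intro reach _ _ hfuel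
    exact absurd hfuel (by omega)
  | succ f ih =>
    intro reach hsR hstart hfuel
    by_cases hnew : pvRound end_ adjacency obstacles reach = []
    · rw [show pvSatB end_ adjacency obstacles (f + 1) reach = reach.contains end_ from by
        simp [pvSatB, hnew]]
      constructor
      · intro h
        exact hsR end_ (List.contains_iff_mem.mp h)
      · intro hr
        exact List.contains_iff_mem.mpr (pvReach_subset_closed adjacency obstacles end_ start
          reach hstart (pvRound_nil_closed end_ adjacency obstacles reach hnew) end_ hr)
    · rw [show pvSatB end_ adjacency obstacles (f + 1) reach =
          pvSatB end_ adjacency obstacles f (reach ++ pvRound end_ adjacency obstacles reach) from by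
        simp [pvSatB, hnew]]
      apply ih
      · intro x hx
        rcases List.mem_append.mp hx with h | h
        · exact hsR x h
        · obtain ⟨hnr, hno, u, hu, hune, hnb⟩ := pvRound_mem end_ adjacency obstacles reach x h
          exact pvReach.step (hsR u hu) hune hnb hno
      · exact List.mem_append_left _ hstart
      · obtain ⟨n0, hn0⟩ := List.exists_mem_of_ne_nil _ hnew
        obtain ⟨h1, h2, u, hu, hu2, hnb⟩ := pvRound_mem end_ adjacency obstacles reach n0 hn0
        have hc : n0 ∈ pvCand adjacency := pvNbrs_subset_cand adjacency u n0 hnb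
        have hmono : ((pvCand adjacency).filter
              (fun c => decide (c ∉ reach ++ pvRound end_ adjacency obstacles reach))).Sublist
            ((pvCand adjacency).filter (fun c => decide (c ∉ reach))) :=
          List.monotone_filter_right _ (fun a ha =>
            decide_eq_true (fun hm => (of_decide_eq_true ha) (List.mem_append_left _ hm)))
        have hlt : pvUnvis adjacency (reach ++ pvRound end_ adjacency obstacles reach) <
            pvUnvis adjacency reach := by
          unfold pvUnvis
          rcases lt_or_eq_of_le hmono.length_le with hl | hl
          · exact hl
          · exfalso
            have heq := hmono.eq_of_length hl
            have hmem : n0 ∈ (pvCand adjacency).filter (fun c => decide (c ∉ reach)) :=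
              List.mem_filter.mpr ⟨hc, decide_eq_true h1⟩
            rw [← heq] at hmem
            exact (of_decide_eq_true (List.mem_filter.mp hmem).2) (List.mem_append_right _ hn0)
        omega

-- ===== VERDICT (by name: the statement is the Claim_ definition above) =====
theorem bfs_path_exists_spec : Claim_equal_bfs_path_exists := by
  intro start end_ adjacency obstacles _ _
  unfold Spec_bfs_path_exists bfs_path_exists bfs_path_exists_alt
  by_cases h : start = end_
  · simp [h]
  · simp only [if_neg h]
    have hfuel : 1 + pvUnvis adjacency [start] ≤ pvFuel adjacency :=
      le_trans (by have := pvUnvis_le adjacency [start]; omega) (pvFuel_ge adjacency)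
    have hA := pvLoopA_iff adjacency obstacles end_ start (pvFuel adjacency)
      (PySem.Set.ofList [start]) [start]
      (by intro x hx; simpa [PySem.Set.ofList, PySem.Set.add, PySem.Set.empty, PySem.Set.contains] using hx)
      (by intro x hx
          have : x = start := by
            simpa [PySem.Set.ofList, PySem.Set.add, PySem.Set.empty, PySem.Set.contains] using hx
          subst this; exact pvReach.base)
      (by simp [PySem.Set.ofList, PySem.Set.add, PySem.Set.empty, PySem.Set.contains])
      (by intro hm
          have : end_ = start := by
            simpa [PySem.Set.ofList, PySem.Set.add, PySem.Set.empty, PySem.Set.contains] using hm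
          exact absurd this.symm h)
      (by intro u hu hnq
          have : u = start := by
            simpa [PySem.Set.ofList, PySem.Set.add, PySem.Set.empty, PySem.Set.contains] using hu
          subst this; simp at hnq)
      (by show ([start].length) + pvUnvis adjacency (PySem.Set.ofList [start]) ≤ pvFuel adjacency
          have : PySem.Set.ofList [start] = [start] := rfl
          rw [this]; simp only [List.length_cons, List.length_nil]; omega)
    have hB := pvSatB_iff adjacency obstacles end_ start (pvFuel adjacency) [start]
      (by intro x hx
          have : x = start := by simpa using hx
          subst this; exact pvReach.base)
      (by simp)
      hfuel
    rw [Bool.eq_iff_iff, hA, hB]
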